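-- pv_equiv track=rewrite | github.com/youngkwangjoo/codingTest | 프로그래머스/1/160586. 대충 만든 자판/대충 만든 자판.py | solution
-- ===== SOURCE A (Python) =====
-- def create_keymap_dict(keymap):
--     dic = {}
--     for index, string in enumerate(keymap):
--         for pos, char in enumerate(string):
--             # 딕셔너리에 문자가 없거나 현재 pos가 더 작을 경우 갱신
--             if char not in dic or pos + 1 < dic[char]:
--                 dic[char] = pos + 1
--     return dic
--
-- def solution(keymap, targets):
--     answer = []
--     dic = create_keymap_dict(keymap)
--
--     for target in targets:
--         count = 0
--         for char in target:
--             if char in dic: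
--                 count += dic[char]
--             else:
--                 count = -1
--                 break
--         answer.append(count)
--
--     return answer
-- ===== SOURCE B (Python) =====
-- def solution(keymap, targets):
--     answer = []
--     for target in targets:
--         count = 0
--         for char in target:
--             positions = [s.index(char) + 1 for s in keymap if char in s]
--             if not positions:
--                 count = -1
--                 break
--             count += min(positions)
--         answer.append(count)
--     return answer
-- ===== Notes on version B (the rewrite author's own statement) =====
-- stated objective: simpler
-- what changed: Drops the precomputed best-position dictionary: each target character directly scans every keymap string for its earliest position and takes the minimum, short-circuiting to -1 when no string contains it.
import Mathlib
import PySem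

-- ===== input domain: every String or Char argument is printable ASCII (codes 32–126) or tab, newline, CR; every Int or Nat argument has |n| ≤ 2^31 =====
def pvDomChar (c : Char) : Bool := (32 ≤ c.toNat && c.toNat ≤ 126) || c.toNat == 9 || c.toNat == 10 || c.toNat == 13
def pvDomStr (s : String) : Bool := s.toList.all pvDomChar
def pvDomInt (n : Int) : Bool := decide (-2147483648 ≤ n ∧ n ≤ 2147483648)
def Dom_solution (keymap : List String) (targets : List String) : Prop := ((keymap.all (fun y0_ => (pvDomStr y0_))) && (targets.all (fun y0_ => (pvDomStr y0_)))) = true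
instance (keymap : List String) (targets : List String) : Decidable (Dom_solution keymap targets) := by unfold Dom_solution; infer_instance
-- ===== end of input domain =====

-- B drops A's precomputed best-position dictionary and instead scans the keymap
-- directly per target character (same results; different decomposition, not faster).

-- ===== PORT A =====
-- inner-loop body of create_keymap_dict: `if char not in dic or pos + 1 < dic[char]: dic[char] = pos + 1`
-- (dic[char] is only read when the key is present, so the getD default 0 is never observed)
def innerStep (dic : PySem.Dict Char Int) (q : Int × Char) : PySem.Dict Char Int :=
  if !(dic.contains q.2) || decide (q.1 + 1 < dic.getD q.2 0) then dic.insert q.2 (q.1 + 1) else dic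

def createKeymapDict (keymap : List String) : PySem.Dict Char Int :=
  (PySem.List.enumerate keymap 0).foldl
    (fun dic p => (PySem.List.enumerate p.2.toList 0).foldl innerStep dic)
    PySem.Dict.empty

-- the `for char in target` loop of A: count += dic[char], or -1 and break
def countA (dic : PySem.Dict Char Int) : List Char → Int → Int
  | [], count => count
  | c :: rest, count =>
    match dic.get? c with
    | some v => countA dic rest (count + v)
    | none => -1

def solution (keymap : List String) (targets : List String) : List Int :=
  let dic := createKeymapDict keymap
  targets.foldl (fun answer t => answer ++ [countA dic t.toList 0]) []

-- ===== PORT B =====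
-- positions = [s.index(char) + 1 for s in keymap if char in s]
-- (s.index(char) is guarded by `char in s`, so it equals find, which never returns -1 here)
def positionsB (keymap : List String) (c : Char) : List Int :=
  (keymap.filter (fun s => PySem.Str.isIn (String.ofList [c]) s)).map
    (fun s => PySem.Str.find s (String.ofList [c]) + 1)

-- the `for char in target` loop of B: add min(positions), or -1 and break if empty
def countB (keymap : List String) : List Char → Int → Int
  | [], count => count
  | c :: rest, count =>
    match PySem.List.min? (positionsB keymap c) (fun x => x) with
    | none => -1
    | some m => countB keymap rest (count + m)

def solution_alt (keymap : List String) (targets : List String) : List Int :=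
  targets.foldl (fun answer t => answer ++ [countB keymap t.toList 0]) []

-- ===== PRECONDITION & SPEC =====
def Spec_solution (keymap : List String) (targets : List String) (out : List Int) : Prop := out = solution_alt keymap targets
instance (keymap : List String) (targets : List String) (out : List Int) : Decidable (Spec_solution keymap targets out) := by unfold Spec_solution; infer_instance

-- ===== CLAIM (what is proved, stated in full; the proofs are below) =====
def Claim_equal_solution : Prop := ∀ (keymap : List String) (targets : List String), Dom_solution keymap targets → Spec_solution keymap targets (solution keymap targets)

-- ===== LEMMAS AND PROOFS =====

-- first index of c in cs, counting from k (none = absent)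
def fp : List Char → Char → Nat → Option Nat
  | [], _, _ => none
  | x :: t, c, k => if x = c then some k else fp t c (k + 1)

-- min of two optional keypress counts (none = no occurrence)
def omin : Option Int → Option Int → Option Int
  | none, b => b
  | some x, none => some x
  | some x, some y => some (min x y)

-- best (smallest) keypress count for c over the whole keymap
def bestKm : List String → Char → Option Int
  | [], _ => none
  | s :: r, c => omin ((fp s.toList c 0).map (fun j => (j : Int) + 1)) (bestKm r c)

lemma omin_none_right (a : Option Int) : omin a none = a := by cases a <;> rfl

lemma omin_assoc (a b c : Option Int) : omin (omin a b) c = omin a (omin b c) := by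
  cases a <;> cases b <;> cases c <;> simp [omin, min_assoc]

lemma fp_lower {cs : List Char} {c : Char} : ∀ {k j : Nat}, fp cs c k = some j → k ≤ j := by
  induction cs with
  | nil => intro k j h; simp [fp] at h
  | cons x t ih =>
    intro k j h
    by_cases hx : x = c
    · simp [fp, hx] at h; omega
    · simp [fp, hx] at h; have := ih h; omega

lemma innerStep_get_self (d : PySem.Dict Char Int) (i : Int) (c : Char) :
    (innerStep d (i, c)).get? c = omin (d.get? c) (some (i + 1)) := by
  unfold innerStep
  rw [PySem.Dict.contains_eq_isSome_get?, PySem.Dict.getD_eq_get?_getD]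
  cases h : d.get? c with
  | none => simp [PySem.Dict.get?_insert_self, omin]
  | some v =>
    by_cases hlt : i + 1 < v
    · simp [hlt, PySem.Dict.get?_insert_self, omin]; omega
    · simp [hlt, h, omin]; omega

lemma innerStep_get_ne (d : PySem.Dict Char Int) (p : Int × Char) (c : Char) (h : c ≠ p.2) :
    (innerStep d p).get? c = d.get? c := by
  unfold innerStep
  split
  · exact PySem.Dict.get?_insert_of_ne _ _ h
  · rfl

lemma omin_absorb (a : Option Int) (v : Int) (m : Option Int)
    (h : ∀ j, m = some j → v ≤ j) : omin (omin a (some v)) m = omin a (some v) := by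
  cases a <;> cases m <;> simp [omin] at * <;> omega

lemma inner_get (cs : List Char) : ∀ (i : Nat) (d : PySem.Dict Char Int) (c : Char),
    ((PySem.List.enumerate cs (i : Int)).foldl innerStep d).get? c
      = omin (d.get? c) ((fp cs c i).map (fun j => (j : Int) + 1)) := by
  induction cs with
  | nil => intro i d c; simp [PySem.List.enumerate, fp, omin_none_right]
  | cons x t ih =>
    intro i d c
    rw [PySem.List.enumerate_cons]
    have hcast : (i : Int) + 1 = ((i + 1 : Nat) : Int) := by push_cast; ring
    simp only [List.foldl_cons, hcast, ih (i + 1)]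
    by_cases hx : x = c
    · subst hx
      rw [innerStep_get_self]
      simp only [fp, if_true]
      apply omin_absorb
      intro j hj
      cases hfp : fp t x (i + 1) with
      | none => simp [hfp] at hj
      | some j' =>
        have := fp_lower hfp
        simp [hfp] at hj
        omega
    · rw [innerStep_get_ne _ _ _ (fun hc => hx hc.symm)]
      simp [fp, hx]

lemma outer_get (km : List String) : ∀ (i : Int) (d : PySem.Dict Char Int) (c : Char),
    ((PySem.List.enumerate km i).foldl
        (fun dic p => (PySem.List.enumerate p.2.toList 0).foldl innerStep dic) d).get? c
      = omin (d.get? c) (bestKm km c) := by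
  induction km with
  | nil => intro i d c; simp [PySem.List.enumerate, bestKm, omin_none_right]
  | cons s r ih =>
    intro i d c
    rw [PySem.List.enumerate_cons]
    simp only [List.foldl_cons, ih]
    have h0 : ((0 : Nat) : Int) = (0 : Int) := rfl
    rw [← h0, inner_get, omin_assoc]
    rfl

lemma createKeymapDict_get (km : List String) (c : Char) :
    (createKeymapDict km).get? c = bestKm km c := by
  unfold createKeymapDict
  rw [outer_get]
  simp [omin]

lemma foldl_min_comm (t : List Int) : ∀ (a b : Int), t.foldl min (min a b) = min a (t.foldl min b) := by
  induction t with
  | nil => intro a b; rfl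
  | cons c t ih =>
    intro a b
    simp only [List.foldl_cons, min_assoc, ih]

lemma min?_cons_omin (x : Int) (t : List Int) :
    PySem.List.min? (x :: t) (fun y => y) = omin (some x) (PySem.List.min? t (fun y => y)) := by
  cases t with
  | nil => rfl
  | cons y t' =>
    rw [PySem.List.min?_id_cons, PySem.List.min?_id_cons]
    simp only [List.foldl_cons, omin]
    rw [← foldl_min_comm t' x y]

lemma find_go_single (cs : List Char) : ∀ (k : Nat) (c : Char),
    PySem.Chars.find.go [c] cs k = match fp cs c k with
      | some j => (j : Int)
      | none => -1 := by
  induction cs with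
  | nil => intro k c; simp [PySem.Chars.find.go, fp]
  | cons h t ih =>
    intro k c
    by_cases hc : c = h
    · subst hc
      simp [PySem.Chars.find.go, List.isPrefixOf, fp]
    · simp [PySem.Chars.find.go, List.isPrefixOf, fp, hc, Ne.symm hc, ih (k + 1)]

lemma positionsB_min (km : List String) (c : Char) :
    PySem.List.min? (positionsB km c) (fun x => x) = bestKm km c := by
  induction km with
  | nil => rfl
  | cons s r ih =>
    have hfind : PySem.Chars.find s.toList [c] = (match fp s.toList c 0 with
      | some j => (j : Int)
      | none => -1) := find_go_single s.toList 0 c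
    cases hfp : fp s.toList c 0 with
    | none =>
      have hin : PySem.Chars.isIn [c] s.toList = false := by
        simp [PySem.Chars.isIn, hfind, hfp]
      rw [show bestKm (s :: r) c = bestKm r c by simp [bestKm, hfp, omin]]
      rw [← ih]
      simp [positionsB, hin]
    | some j =>
      have hin : PySem.Chars.isIn [c] s.toList = true := by
        simp [PySem.Chars.isIn, hfind, hfp]
      have hpos : positionsB (s :: r) c
          = (PySem.Chars.find s.toList [c] + 1) :: positionsB r c := by
        simp [positionsB, hin]
      rw [hpos, min?_cons_omin, ih, hfind, hfp]
      simp [bestKm, hfp]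

lemma count_eq (km : List String) : ∀ (cs : List Char) (count : Int),
    countA (createKeymapDict km) cs count = countB km cs count := by
  intro cs
  induction cs with
  | nil => intro count; rfl
  | cons c rest ih =>
    intro count
    simp only [countA, countB, createKeymapDict_get, positionsB_min]
    cases bestKm km c with
    | none => rfl
    | some v => exact ih (count + v)

-- ===== VERDICT (by name: the statement is the Claim_ definition above) =====
theorem solution_spec : Claim_equal_solution := by
  intro keymap targets _
  unfold Spec_solution solution solution_alt
  simp only [count_eq]
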